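-- pv_equiv track=rewrite | github.com/KamradSmeshnyavy/MIREA-crypto | app/main.py | richelieu_encode
-- ===== SOURCE A (Python) =====
-- from typing import List, Tuple
--
-- def parse_cycles(key: str) -> List[List[int]]:
--     cycles = []
--     buf = ""
--     inside = False
--     for ch in key:
--         if ch == "(":
--             inside = True
--             buf = ""
--         elif ch == ")":
--             inside = False
--             if buf:
--                 cycles.append([int(x) for x in buf if x.isdigit()])
--         elif inside:
--             buf += ch
--     return cycles
--
-- def richelieu_encode(plain: str, key: str) -> str:
--     cycles = parse_cycles(key)
--     idx = 0
--     cipher = []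
--     for cycle in cycles:
--         block = list(plain[idx : idx + len(cycle)])
--         idx += len(cycle)
--         inv = [0] * len(cycle)
--         for i, cpos in enumerate(cycle):
--             inv[cpos - 1] = i
--         cipher_block = [""] * len(cycle)
--         for i, _ in enumerate(block):
--             cipher_block[i] = block[inv[i]]
--         cipher.extend(cipher_block)
--     return "".join(cipher) + plain[idx:]
-- ===== SOURCE B (Python) =====
-- from typing import List
--
-- def parse_cycles(key: str) -> List[List[int]]:
--     cycles = []
--     buf = ""
--     inside = False
--     for ch in key:
--         if ch == "(":
--             inside = True
--             buf = ""
--         elif ch == ")":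
--             inside = False
--             if buf:
--                 cycles.append([int(x) for x in buf if x.isdigit()])
--         elif inside:
--             buf += ch
--     return cycles
--
-- def richelieu_encode(plain: str, key: str) -> str:
--     pairs = []
--     idx = 0
--     for cycle in parse_cycles(key):
--         for cpos, ch in zip(cycle, plain[idx : idx + len(cycle)]):
--             pairs.append((idx + cpos - 1, ch))
--         idx += len(cycle)
--     pairs.sort(key=lambda p: p[0])
--     return "".join(ch for _, ch in pairs) + plain[idx:]
-- ===== Notes on version B (the rewrite author's own statement) =====
-- stated objective: alternative
-- what changed: A permutes each block in place by building an inverse-permutation array and gathering cipher_block[i]=block[inv[i]] per cycle; B never permutes a block: it makes one pass collecting flat (target_position, char) pairs across all cycles, then applies the whole permutation at once with a single stable sort by target position and a join.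
-- outside the precondition, e.g. on richelieu_encode('ab', '(11)'): A returns 'ba', B returns 'ab'; on richelieu_encode('ab', '(22)'): A returns 'ab', B returns 'ab'
import Mathlib
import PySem

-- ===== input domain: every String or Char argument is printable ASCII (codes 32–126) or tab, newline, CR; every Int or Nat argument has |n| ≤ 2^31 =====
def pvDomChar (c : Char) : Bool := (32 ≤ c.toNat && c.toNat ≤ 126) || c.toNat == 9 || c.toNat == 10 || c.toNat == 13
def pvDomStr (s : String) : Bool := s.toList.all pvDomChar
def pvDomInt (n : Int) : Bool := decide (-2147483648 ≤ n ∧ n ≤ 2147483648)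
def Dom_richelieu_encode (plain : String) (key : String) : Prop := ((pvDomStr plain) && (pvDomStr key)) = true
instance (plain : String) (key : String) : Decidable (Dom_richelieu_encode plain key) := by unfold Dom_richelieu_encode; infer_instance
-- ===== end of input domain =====

-- B replaces A's per-block inverse-permutation-and-gather by a flat list of (target position, char)
-- pairs over all cycles followed by ONE stable sort by target position (alternative algorithm).

-- ===== PORT A =====
-- int(x) for a single ASCII digit character x
def pvDigitVal (c : Char) : Int := ((c.toNat - 48 : Nat) : Int)

-- shared helper: parse_cycles (Source A and Source B contain the identical function)
def parseStep (st : List (List Int) × List Char × Bool) (ch : Char) : List (List Int) × List Char × Bool :=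
  if ch = '(' then (st.1, ([], true))
  else if ch = ')' then
    ((if st.2.1.isEmpty then st.1
      else st.1 ++ [(st.2.1.filter PySem.Chars.isdigit).map pvDigitVal]), (st.2.1, false))
  else if st.2.2 then (st.1, (st.2.1 ++ [ch], true)) else st

def parseCycles (key : String) : List (List Int) :=
  (key.toList.foldl parseStep ([], ([], false))).1

-- one iteration of A's `for cycle in cycles` loop; state = (idx, cipher).
-- cipher_block entries are Python strings "" / single chars: modelled as List Char ([] / [ch]).
-- block[inv[i]] raises IndexError out of range: pyGetD default ' ' is used there; exactly those inputs are outside Pre_.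
def encStepA (plain : List Char) (st : Int × List (List Char)) (c : List Int) : Int × List (List Char) :=
  let block := PySem.List.slice plain (some st.1) (some (st.1 + PySem.List.len c))
  let inv : List Int := (PySem.List.enumerate c).foldl
      (fun a p => PySem.List.pySetD a (p.2 - 1) p.1) (List.replicate c.length 0)
  let cb : List (List Char) := (PySem.List.enumerate block).foldl
      (fun a p => PySem.List.pySetD a p.1 [PySem.List.pyGetD block (PySem.List.pyGetD inv p.1 0) ' ']) (List.replicate c.length [])
  (st.1 + PySem.List.len c, st.2 ++ cb)

def richelieu_encode (plain : String) (key : String) : String :=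
  let r := (parseCycles key).foldl (encStepA plain.toList) (0, [])
  String.ofList (r.2.flatten ++ PySem.List.slice plain.toList (some r.1) none)

-- ===== PORT B =====
-- one iteration of B's pair-collecting loop; state = (idx, pairs): append (idx + cpos - 1, ch) for the zipped block
def encStepB (plain : List Char) (st : Int × List (Int × Char)) (c : List Int) : Int × List (Int × Char) :=
  let block := PySem.List.slice plain (some st.1) (some (st.1 + PySem.List.len c))
  (st.1 + PySem.List.len c, st.2 ++ (c.zip block).map (fun p => (st.1 + p.1 - 1, p.2)))

def richelieu_encode_alt (plain : String) (key : String) : String :=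
  let r := (parseCycles key).foldl (encStepB plain.toList) (0, [])
  String.ofList ((PySem.List.sorted r.2 (fun p => p.1) false).map (fun p => p.2)
    ++ PySem.List.slice plain.toList (some r.1) none)

-- ===== PRECONDITION & SPEC =====
-- the cycle is a permutation of 1..len(cycle)
def cycleOk (c : List Int) : Prop := c.Perm ((List.range c.length).map (fun (k : Nat) => (k : Int) + 1))

-- scanning the cycles against the remaining length r of plain: the cycle that straddles the end of
-- plain must send its first r positions into 1..r, else A's gather `block[inv[i]]` raises IndexError
def tailOkB : List (List Int) → Nat → Bool
  | [], _ => true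
  | c :: cs, r => if c.length ≤ r then tailOkB cs (r - c.length) else (c.take r).all (fun x => x ≤ (r : Int))

-- Pre_ excludes (i) keys with a malformed cycle — duplicate, zero or out-of-range positions — on which the
-- block permutation is undefined and A's returned value (when it returns) is an accident of its leftover-zero
-- inverse array, both outputs being equally arbitrary; and (ii) inputs where A's gather raises IndexError.
def Pre_richelieu_encode (plain : String) (key : String) : Prop :=
  (∀ c ∈ parseCycles key, cycleOk c) ∧ tailOkB (parseCycles key) plain.toList.length = true

instance (plain : String) (key : String) : Decidable (Pre_richelieu_encode plain key) := by
  unfold Pre_richelieu_encode cycleOk; infer_instance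

def pvWitness_richelieu_encode : String × String := ("abcdef", "(312)(21)")

def Spec_richelieu_encode (plain : String) (key : String) (out : String) : Prop := out = richelieu_encode_alt plain key
instance (plain : String) (key : String) (out : String) : Decidable (Spec_richelieu_encode plain key out) := by unfold Spec_richelieu_encode; infer_instance

-- ===== CLAIM (what is proved, stated in full; the proofs are below) =====
def Claim_equal_richelieu_encode : Prop := ∀ (plain : String) (key : String), Dom_richelieu_encode plain key → Pre_richelieu_encode plain key → Spec_richelieu_encode plain key (richelieu_encode plain key)


-- ===== LEMMAS AND PROOFS =====

lemma length_foldl_pySetD {α β : Type} (l : List β) (f : β → Int) (v : β → α) (init : List α) :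
    (l.foldl (fun a b => PySem.List.pySetD a (f b) (v b)) init).length = init.length := by
  induction l generalizing init with
  | nil => rfl
  | cons b l ih => simp [List.foldl_cons, ih, PySem.List.length_pySetD]

lemma find?_eq_some_of_unique {β : Type} (l : List β) (p : β → Bool) (b : β) (hb : b ∈ l) (hpb : p b = true)
    (huniq : ∀ x ∈ l, p x = true → x = b) : l.find? p = some b := by
  induction l with
  | nil => cases hb
  | cons h t ih =>
    by_cases hph : p h = true
    · rw [List.find?_cons_of_pos hph]
      exact congrArg some (huniq h (by simp) hph)
    · have hbt : b ∈ t := by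
        rcases List.mem_cons.mp hb with rfl | h'
        · exact absurd hpb hph
        · exact h'
      rw [List.find?_cons_of_neg (by simp [hph])]
      exact ih hbt (fun x hx hpx => huniq x (by simp [hx]) hpx)

lemma foldl_pySetD_getElem? {α β : Type} (l : List β) (f : β → Int) (v : β → α) (init : List α)
    (hf : ∀ b ∈ l, 0 ≤ f b ∧ f b < (init.length : Int)) (j : Nat) :
    (l.foldl (fun a b => PySem.List.pySetD a (f b) (v b)) init)[j]? =
      (match l.reverse.find? (fun b => f b == (j : Int)) with
       | some b => if j < init.length then some (v b) else none
       | none => init[j]?) := by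
  induction l using List.reverseRecOn with
  | nil => simp
  | append_singleton l b ih =>
    have hfb := hf b (by simp)
    have hlen := length_foldl_pySetD l f v init
    rw [List.foldl_append]
    simp only [List.foldl_cons, List.foldl_nil]
    rw [PySem.List.pySetD_of_nonneg _ _ hfb.1]
    rw [List.getElem?_set, hlen]
    rw [List.reverse_append]
    simp only [List.reverse_singleton, List.singleton_append, List.find?_cons]
    by_cases hj : f b = (j : Int)
    · simp [hj]
    · have h1 : (f b).toNat ≠ j := by omega
      have h2 : (f b == (j:Int)) = false := by simp [hj]
      rw [if_neg h1, h2]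
      exact ih (fun x hx => hf x (by simp [hx]))

lemma mem_rangemap_iff {n : Nat} {x : Int} :
    x ∈ (List.range n).map (fun (k : Nat) => (k : Int) + 1) ↔ 1 ≤ x ∧ x ≤ (n : Int) := by
  simp only [List.mem_map]
  constructor
  · rintro ⟨k, hk, rfl⟩
    have := List.mem_range.mp hk
    omega
  · intro h
    exact ⟨(x - 1).toNat, List.mem_range.mpr (by omega), by omega⟩

lemma mem_enumerate {α : Type} (xs : List α) (d : α) (p : Int × α) :
    p ∈ PySem.List.enumerate xs ↔ ∃ i : Nat, ∃ _ : i < xs.length, p = ((i : Int), xs[i]) := by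
  rw [PySem.List.enumerate_eq_map_pyRange xs d]
  simp only [List.mem_map, PySem.List.mem_pyRange_one, PySem.List.len_eq]
  constructor
  · rintro ⟨z, ⟨hz0, hz1⟩, rfl⟩
    refine ⟨z.toNat, by omega, ?_⟩
    rw [PySem.List.pyGetD_eq_getElem xs d hz0 hz1]
    simp [Int.toNat_of_nonneg hz0]
  · rintro ⟨i, hi, rfl⟩
    refine ⟨(i : Int), ⟨by omega, by omega⟩, ?_⟩
    rw [PySem.List.pyGetD_eq_getElem xs d (by omega) (by omega)]
    simp

lemma cycleOk_mem_bounds {cyc : List Int} (h : cycleOk cyc) : ∀ x ∈ cyc, 1 ≤ x ∧ x ≤ (cyc.length : Int) := by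
  intro x hx
  exact mem_rangemap_iff.mp (h.mem_iff.mp hx)

lemma cycleOk_nodup {cyc : List Int} (h : cycleOk cyc) : cyc.Nodup := by
  refine h.symm.nodup ?_
  exact List.Nodup.map (f := fun (k : Nat) => (k : Int) + 1) (fun a b hab => by simpa using hab) List.nodup_range

lemma coverage {cyc : List Int} {m : Nat} (hperm : cycleOk cyc) (hm : m ≤ cyc.length)
    (hpref : ∀ x ∈ cyc.take m, x ≤ (m : Int)) (j : Nat) (hj : j < m) :
    ∃ i : Nat, i < m ∧ cyc[i]? = some ((j : Int) + 1) := by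
  have hnd : cyc.Nodup := cycleOk_nodup hperm
  have hndt : (cyc.take m).Nodup := (List.take_sublist m cyc).nodup hnd
  have hlent : (cyc.take m).length = m := by simp [hm]
  have hsub : (cyc.take m).toFinset ⊆ Finset.Icc (1 : Int) (m : Int) := by
    intro x hx
    rw [List.mem_toFinset] at hx
    have h1 := (cycleOk_mem_bounds hperm x (List.mem_of_mem_take hx)).1
    have h2 := hpref x hx
    simp only [Finset.mem_Icc]
    exact ⟨h1, h2⟩
  have hcard : (Finset.Icc (1 : Int) (m : Int)).card = m := by
    rw [Int.card_Icc]; omega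
  have heq : (cyc.take m).toFinset = Finset.Icc (1 : Int) (m : Int) := by
    refine Finset.eq_of_subset_of_card_le hsub ?_
    rw [hcard, List.toFinset_card_of_nodup hndt, hlent]
  have hmem : ((j : Int) + 1) ∈ cyc.take m := by
    rw [← List.mem_toFinset, heq, Finset.mem_Icc]
    omega
  obtain ⟨i, hi, he⟩ := List.mem_iff_getElem.mp hmem
  rw [hlent] at hi
  refine ⟨i, hi, ?_⟩
  rw [List.getElem_take] at he
  simp [List.getElem?_eq_getElem (show i < cyc.length by omega), he]

lemma length_foldl_preserve {α β : Type} (l : List β) (g : List α → β → List α)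
    (h : ∀ a b, (g a b).length = a.length) (init : List α) : (l.foldl g init).length = init.length := by
  induction l generalizing init with
  | nil => rfl
  | cons b l ih => rw [List.foldl_cons, ih, h]

lemma mem_zip_iff {α β : Type} (l : List α) (l' : List β) (x : α × β) :
    x ∈ l.zip l' ↔ ∃ i : Nat, ∃ _ : i < l.length, ∃ _ : i < l'.length, x = (l[i], l'[i]) := by
  constructor
  · intro hx
    obtain ⟨i, hi, he⟩ := List.mem_iff_getElem.mp hx
    rw [List.length_zip] at hi
    refine ⟨i, by omega, by omega, ?_⟩
    rw [← he, List.getElem_zip]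
  · rintro ⟨i, h1, h2, rfl⟩
    rw [List.mem_iff_getElem]
    refine ⟨i, by rw [List.length_zip]; omega, ?_⟩
    rw [List.getElem_zip]

-- the scatter array over (cycle, block) pairs (proof-side device linking the two ports)
def scatterB (cy : List Int) (b : List Char) : List (List Char) :=
  (cy.zip b).foldl (fun a p => PySem.List.pySetD a (p.1 - 1) [p.2]) (List.replicate cy.length ([] : List Char))

lemma block_eq (cyc : List Int) (block : List Char) (hperm : cycleOk cyc)
    (hm : block.length ≤ cyc.length)
    (hpref : ∀ x ∈ cyc.take block.length, x ≤ ((block.length : Nat) : Int)) :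
    ((PySem.List.enumerate block).foldl
      (fun a p => PySem.List.pySetD a p.1
        [PySem.List.pyGetD block (PySem.List.pyGetD
          ((PySem.List.enumerate cyc).foldl (fun a p => PySem.List.pySetD a (p.2 - 1) p.1) (List.replicate cyc.length (0 : Int)))
          p.1 0) ' ']) (List.replicate cyc.length ([] : List Char)))
    = scatterB cyc block := by
  have hnd : cyc.Nodup := cycleOk_nodup hperm
  -- the inverse array lookup
  have hinvget : ∀ (j i : Nat), j < cyc.length → i < cyc.length → cyc[i]? = some ((j : Int) + 1) →
      PySem.List.pyGetD
        ((PySem.List.enumerate cyc).foldl (fun a p => PySem.List.pySetD a (p.2 - 1) p.1) (List.replicate cyc.length (0 : Int)))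
        ((j : Nat) : Int) 0 = (i : Int) := by
    intro j i hj hi hci
    have hcie : cyc[i] = (j : Int) + 1 := by
      have := List.getElem?_eq_getElem hi
      rw [this] at hci
      exact Option.some.inj hci
    have hf : ∀ p ∈ PySem.List.enumerate cyc, 0 ≤ p.2 - 1 ∧ p.2 - 1 < ((List.replicate cyc.length (0 : Int)).length : Int) := by
      intro p hp
      obtain ⟨i2, hi2, rfl⟩ := (mem_enumerate cyc 0 p).mp hp
      have hb := cycleOk_mem_bounds hperm _ (List.getElem_mem hi2)
      simp only [List.length_replicate]
      omega
    have h := foldl_pySetD_getElem? (PySem.List.enumerate cyc) (fun p => p.2 - 1) (fun p => p.1)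
        (List.replicate cyc.length (0 : Int)) hf j
    simp only [] at h
    have hfind : (PySem.List.enumerate cyc).reverse.find? (fun p => p.2 - 1 == (j : Int)) = some ((i : Int), (j : Int) + 1) := by
      apply find?_eq_some_of_unique
      · rw [List.mem_reverse, mem_enumerate cyc 0]
        exact ⟨i, hi, by rw [hcie]⟩
      · simp
      · rintro x hx hpx
        rw [List.mem_reverse] at hx
        obtain ⟨i2, hi2, rfl⟩ := (mem_enumerate cyc 0 x).mp hx
        simp only [beq_iff_eq] at hpx
        have he2 : cyc[i2] = cyc[i] := by rw [hcie]; omega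
        have : i2 = i := (List.Nodup.getElem_inj_iff hnd).mp he2
        subst this
        rw [hcie]
    rw [PySem.List.pyGetD_natCast, List.getD_eq_getElem?_getD, h, hfind]
    simp [hj]
  apply List.ext_getElem?
  intro j
  have hlenA : (((PySem.List.enumerate block).foldl
      (fun a p => PySem.List.pySetD a p.1
        [PySem.List.pyGetD block (PySem.List.pyGetD
          ((PySem.List.enumerate cyc).foldl (fun a p => PySem.List.pySetD a (p.2 - 1) p.1) (List.replicate cyc.length (0 : Int)))
          p.1 0) ' ']) (List.replicate cyc.length ([] : List Char)))).length = cyc.length := by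
    rw [length_foldl_preserve _ _ (fun a b => PySem.List.length_pySetD a _ _)]
    exact List.length_replicate
  have hlenB : (scatterB cyc block).length = cyc.length := by
    rw [scatterB, length_foldl_preserve _ _ (fun a b => PySem.List.length_pySetD a _ _)]
    exact List.length_replicate
  by_cases hjn : j < cyc.length
  case neg =>
    rw [List.getElem?_eq_none (by omega), List.getElem?_eq_none (by omega)]
  case pos =>
  -- A side
  have hfA : ∀ p ∈ PySem.List.enumerate block, 0 ≤ p.1 ∧ p.1 < ((List.replicate cyc.length ([] : List Char)).length : Int) := by
    intro p hp
    obtain ⟨i2, hi2, rfl⟩ := (mem_enumerate block ' ' p).mp hp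
    simp only [List.length_replicate]
    omega
  have hA := foldl_pySetD_getElem? (PySem.List.enumerate block) (fun p => p.1)
      (fun p => [PySem.List.pyGetD block (PySem.List.pyGetD
          ((PySem.List.enumerate cyc).foldl (fun a p => PySem.List.pySetD a (p.2 - 1) p.1) (List.replicate cyc.length (0 : Int)))
          p.1 0) ' '])
      (List.replicate cyc.length ([] : List Char)) hfA j
  simp only [] at hA
  have hfB : ∀ p ∈ cyc.zip block, 0 ≤ p.1 - 1 ∧ p.1 - 1 < ((List.replicate cyc.length ([] : List Char)).length : Int) := by
    intro p hp
    obtain ⟨i2, h1, h2, rfl⟩ := (mem_zip_iff cyc block p).mp hp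
    have hb := cycleOk_mem_bounds hperm _ (List.getElem_mem h1)
    simp only [List.length_replicate]
    omega
  have hB := foldl_pySetD_getElem? (cyc.zip block) (fun p => p.1 - 1) (fun p => [p.2])
      (List.replicate cyc.length ([] : List Char)) hfB j
  simp only [] at hB
  rw [hA, scatterB, hB]
  by_cases hjm : j < block.length
  case pos =>
    obtain ⟨i0, hi0, hci0⟩ := coverage hperm hm hpref j hjm
    have hci0e : cyc[i0]'(by omega) = (j : Int) + 1 := by
      have := List.getElem?_eq_getElem (show i0 < cyc.length by omega)
      rw [this] at hci0
      exact Option.some.inj hci0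
    have hfindA : (PySem.List.enumerate block).reverse.find? (fun p => p.1 == (j : Int)) = some ((j : Int), block[j]) := by
      apply find?_eq_some_of_unique
      · rw [List.mem_reverse, mem_enumerate block ' ']
        exact ⟨j, hjm, rfl⟩
      · simp
      · rintro x hx hpx
        rw [List.mem_reverse] at hx
        obtain ⟨i2, hi2, rfl⟩ := (mem_enumerate block ' ' x).mp hx
        simp only [beq_iff_eq, Int.natCast_inj] at hpx
        subst hpx
        rfl
    have hfindB : (cyc.zip block).reverse.find? (fun p => p.1 - 1 == (j : Int)) = some (cyc[i0]'(by omega), block[i0]) := by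
      apply find?_eq_some_of_unique
      · rw [List.mem_reverse, mem_zip_iff]
        exact ⟨i0, by omega, by omega, rfl⟩
      · simp [hci0e]
      · rintro x hx hpx
        rw [List.mem_reverse] at hx
        obtain ⟨i2, h1, h2, rfl⟩ := (mem_zip_iff cyc block x).mp hx
        simp only [beq_iff_eq] at hpx
        have he2 : cyc[i2] = cyc[i0]'(by omega) := by rw [hci0e]; omega
        have : i2 = i0 := (List.Nodup.getElem_inj_iff hnd).mp he2
        subst this
        rfl
    rw [hfindA, hfindB]
    simp only [List.length_replicate, hjn, if_pos]
    have hget : PySem.List.pyGetD block ((i0 : Nat) : Int) ' ' = block[i0] := by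
      rw [PySem.List.pyGetD_eq_getElem block ' ' (by omega) (by exact_mod_cast hi0)]
      simp
    rw [hinvget j i0 hjn (by omega) hci0, hget]
  case neg =>
    have hfindA : (PySem.List.enumerate block).reverse.find? (fun p => p.1 == (j : Int)) = none := by
      rw [List.find?_eq_none]
      intro x hx
      rw [List.mem_reverse] at hx
      obtain ⟨i2, hi2, rfl⟩ := (mem_enumerate block ' ' x).mp hx
      simp only [beq_iff_eq]
      omega
    have hfindB : (cyc.zip block).reverse.find? (fun p => p.1 - 1 == (j : Int)) = none := by
      rw [List.find?_eq_none]
      intro x hx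
      rw [List.mem_reverse] at hx
      obtain ⟨i2, h1, h2, rfl⟩ := (mem_zip_iff cyc block x).mp hx
      have hmemt : cyc[i2] ∈ cyc.take block.length := by
        rw [List.mem_iff_getElem]
        refine ⟨i2, by simp [hm]; omega, ?_⟩
        rw [List.getElem_take]
      have := hpref _ hmemt
      simp only [beq_iff_eq]
      omega
    rw [hfindA, hfindB]

-- the char planted at output slot j of a block, read off via find? (proof-side)
def gchar (cy : List Int) (b : List Char) (j : Nat) : Char :=
  match (cy.zip b).reverse.find? (fun p => p.1 - 1 == ((j : Nat) : Int)) with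
  | some p => p.2
  | none => ' '

lemma findB_of_getElem {cy : List Int} {b : List Char} (hnd : cy.Nodup) (hm : b.length ≤ cy.length)
    (i j : Nat) (hi : i < b.length) (hc : cy[i]'(by omega) = (j : Int) + 1) :
    (cy.zip b).reverse.find? (fun p => p.1 - 1 == (j : Int)) = some (cy[i]'(by omega), b[i]) := by
  apply find?_eq_some_of_unique
  · rw [List.mem_reverse, mem_zip_iff]
    exact ⟨i, by omega, by omega, rfl⟩
  · simp [hc]
  · rintro x hx hpx
    rw [List.mem_reverse] at hx
    obtain ⟨i2, h1, h2, rfl⟩ := (mem_zip_iff cy b x).mp hx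
    simp only [beq_iff_eq] at hpx
    have he2 : cy[i2] = cy[i]'(by omega) := by rw [hc]; omega
    have : i2 = i := (List.Nodup.getElem_inj_iff hnd).mp he2
    subst this
    rfl

lemma findB_none_of_ge {cy : List Int} {b : List Char}
    (hpref : ∀ x ∈ cy.take b.length, x ≤ ((b.length : Nat) : Int)) (hm : b.length ≤ cy.length)
    (j : Nat) (hj : b.length ≤ j) :
    (cy.zip b).reverse.find? (fun p => p.1 - 1 == (j : Int)) = none := by
  rw [List.find?_eq_none]
  intro x hx
  rw [List.mem_reverse] at hx
  obtain ⟨i2, h1, h2, rfl⟩ := (mem_zip_iff cy b x).mp hx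
  have hmemt : cy[i2] ∈ cy.take b.length := by
    rw [List.mem_iff_getElem]
    refine ⟨i2, by simp [hm]; omega, ?_⟩
    rw [List.getElem_take]
  have := hpref _ hmemt
  simp only [beq_iff_eq]
  omega

lemma flatten_map_singleton {α β : Type} (l : List β) (g : β → α) :
    (l.map (fun x => [g x])).flatten = l.map g := by
  induction l with
  | nil => rfl
  | cons x t ih => simp [ih]

-- the scatter array, flattened, is the block chars listed by output slot
lemma scatter_flatten (cy : List Int) (b : List Char) (hperm : cycleOk cy) (hm : b.length ≤ cy.length)
    (hpref : ∀ x ∈ cy.take b.length, x ≤ ((b.length : Nat) : Int)) :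
    (scatterB cy b).flatten = (List.range b.length).map (gchar cy b) := by
  have hnd : cy.Nodup := cycleOk_nodup hperm
  have hfB : ∀ p ∈ cy.zip b, 0 ≤ p.1 - 1 ∧ p.1 - 1 < ((List.replicate cy.length ([] : List Char)).length : Int) := by
    intro p hp
    obtain ⟨i2, h1, h2, rfl⟩ := (mem_zip_iff cy b p).mp hp
    have hb := cycleOk_mem_bounds hperm _ (List.getElem_mem h1)
    simp only [List.length_replicate]
    omega
  have hlen : (scatterB cy b).length = cy.length := by
    rw [scatterB, length_foldl_preserve _ _ (fun a b => PySem.List.length_pySetD a _ _)]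
    exact List.length_replicate
  -- entrywise description of the scatter array
  have hdesc : scatterB cy b = (List.range cy.length).map (fun j =>
      match (cy.zip b).reverse.find? (fun p => p.1 - 1 == ((j : Nat) : Int)) with
      | some p => [p.2]
      | none => []) := by
    apply List.ext_getElem?
    intro j
    by_cases hjn : j < cy.length
    case neg =>
      rw [List.getElem?_eq_none (by omega), List.getElem?_eq_none (by simp; omega)]
    case pos =>
      have hB := foldl_pySetD_getElem? (cy.zip b) (fun p => p.1 - 1) (fun p => [p.2])
          (List.replicate cy.length ([] : List Char)) hfB j
      simp only [] at hB
      rw [scatterB, hB, List.getElem?_map, List.getElem?_range hjn]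
      cases hfd : (cy.zip b).reverse.find? (fun p => p.1 - 1 == ((j : Nat) : Int)) with
      | some p => simp [hfd, hjn]
      | none => simp [hfd, hjn]
  rw [hdesc]
  -- split range cy.length at b.length
  have hsplit : List.range cy.length = List.range b.length ++ (List.range (cy.length - b.length)).map (b.length + ·) := by
    conv_lhs => rw [show cy.length = b.length + (cy.length - b.length) from by omega]
    rw [List.range_add]
  rw [hsplit, List.map_append, List.flatten_append]
  have htail : ((List.range (cy.length - b.length)).map (b.length + ·)).map (fun j =>
      match (cy.zip b).reverse.find? (fun p => p.1 - 1 == ((j : Nat) : Int)) with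
      | some p => [p.2]
      | none => ([] : List Char)) = (List.range (cy.length - b.length)).map (fun _ => ([] : List Char)) := by
    rw [List.map_map]
    apply List.map_congr_left
    intro x hx
    simp only [Function.comp]
    rw [findB_none_of_ge hpref hm (b.length + x) (by omega)]
  rw [htail]
  have hnil : ((List.range (cy.length - b.length)).map (fun _ => ([] : List Char))).flatten = [] := by
    simp
  rw [hnil, List.append_nil]
  have hhead : (List.range b.length).map (fun j =>
      match (cy.zip b).reverse.find? (fun p => p.1 - 1 == ((j : Nat) : Int)) with
      | some p => [p.2]
      | none => ([] : List Char)) = (List.range b.length).map (fun j => [gchar cy b j]) := by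
    apply List.map_congr_left
    intro j hj
    rw [List.mem_range] at hj
    obtain ⟨i, hi, hci⟩ := coverage hperm hm hpref j hj
    have hcie : cy[i]'(by omega) = (j : Int) + 1 := by
      have := List.getElem?_eq_getElem (show i < cy.length by omega)
      rw [this] at hci
      exact Option.some.inj hci
    rw [findB_of_getElem hnd hm i j hi hcie, gchar, findB_of_getElem hnd hm i j hi hcie]
  rw [hhead, flatten_map_singleton]

-- the pair list B collects for one block is a rearrangement of the enumerated scattered block
lemma pairs_perm (cy : List Int) (b : List Char) (k : Nat) (hperm : cycleOk cy) (hm : b.length ≤ cy.length)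
    (hpref : ∀ x ∈ cy.take b.length, x ≤ ((b.length : Nat) : Int)) :
    ((cy.zip b).map (fun p => ((k : Int) + p.1 - 1, p.2))).Perm
      (PySem.List.enumerate ((List.range b.length).map (gchar cy b)) (k : Int)) := by
  have hnd : cy.Nodup := cycleOk_nodup hperm
  apply List.perm_of_nodup_nodup_toFinset_eq
  · -- pairs nodup: first components distinct
    rw [List.nodup_iff_injective_getElem]
    intro a a2 he
    obtain ⟨i, hi⟩ := a
    obtain ⟨i2, hi2⟩ := a2
    simp only [List.length_map, List.length_zip] at hi hi2
    simp only [List.getElem_map, List.getElem_zip] at he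
    have h1 : cy[i]'(by omega) = cy[i2]'(by omega) := by
      have := congrArg Prod.fst he
      simp only [] at this
      omega
    have := (List.Nodup.getElem_inj_iff hnd).mp h1
    simpa using this
  · -- enumerate nodup
    have := PySem.List.pairwise_lt_enumerate ((List.range b.length).map (gchar cy b)) (k : Int)
    have hne : (PySem.List.enumerate ((List.range b.length).map (gchar cy b)) (k : Int)).Pairwise
        (fun p q => p ≠ q) := by
      refine List.Pairwise.imp ?_ this
      intro a a2 h he
      rw [he] at h
      exact lt_irrefl _ h
    exact hne
  · -- same elements
    apply Finset.ext
    intro x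
    simp only [List.mem_toFinset]
    rw [PySem.List.mem_enumerate_iff]
    constructor
    · intro hx
      rw [List.mem_map] at hx
      obtain ⟨p, hp, rfl⟩ := hx
      obtain ⟨i, h1, h2, rfl⟩ := (mem_zip_iff cy b p).mp hp
      have hbnd := cycleOk_mem_bounds hperm _ (List.getElem_mem h1)
      have hble : cy[i] ≤ ((b.length : Nat) : Int) := by
        apply hpref
        rw [List.mem_iff_getElem]
        exact ⟨i, by simp [hm]; omega, by rw [List.getElem_take]⟩
      refine ⟨(cy[i] - 1).toNat, by simp; omega, ?_⟩
      have hci : cy[i]'(by omega) = (((cy[i] - 1).toNat : Nat) : Int) + 1 := by omega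
      have := findB_of_getElem hnd hm i (cy[i] - 1).toNat h2 hci
      have hg : gchar cy b (cy[i] - 1).toNat = b[i] := by
        rw [gchar, this]
      rw [List.getElem_map, List.getElem_range, hg]
      simp only [Prod.mk.injEq]
      exact ⟨by omega, trivial⟩
    · rintro ⟨j, hj, rfl⟩
      simp only [List.length_map, List.length_range] at hj
      obtain ⟨i, hi, hci⟩ := coverage hperm hm hpref j hj
      have hcie : cy[i]'(by omega) = (j : Int) + 1 := by
        have := List.getElem?_eq_getElem (show i < cy.length by omega)
        rw [this] at hci
        exact Option.some.inj hci
      rw [List.mem_map]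
      refine ⟨(cy[i]'(by omega), b[i]), ?_, ?_⟩
      · rw [mem_zip_iff]
        exact ⟨i, by omega, hi, rfl⟩
      · have hg : gchar cy b j = b[i] := by
          rw [gchar, findB_of_getElem hnd hm i j hi hcie]
        rw [List.getElem_map, List.getElem_range, hg, hcie]
        simp only [Prod.mk.injEq]
        exact ⟨by omega, trivial⟩

-- proof-side abbreviation for the per-cycle block A builds
def blockA (P : List Char) (k : Nat) (cy : List Int) : List (List Char) :=
  (PySem.List.enumerate ((P.drop k).take cy.length)).foldl
      (fun a p => PySem.List.pySetD a p.1
        [PySem.List.pyGetD ((P.drop k).take cy.length) (PySem.List.pyGetD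
          ((PySem.List.enumerate cy).foldl (fun a p => PySem.List.pySetD a (p.2 - 1) p.1) (List.replicate cy.length (0 : Int)))
          p.1 0) ' ']) (List.replicate cy.length ([] : List Char))

lemma outer (P : List Char) : ∀ (cs : List (List Int)) (k : Nat) (ca : List (List Char)) (pb : List (Int × Char)),
    (∀ cy ∈ cs, cycleOk cy) → (P.length ≤ k ∨ tailOkB cs (P.length - k) = true) →
    ca.flatten.length = min k P.length →
    pb.Perm (PySem.List.enumerate ca.flatten 0) →
    (cs.foldl (encStepA P) ((k : Int), ca)).1 = (cs.foldl (encStepB P) ((k : Int), pb)).1 ∧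
    (cs.foldl (encStepB P) ((k : Int), pb)).2.Perm
      (PySem.List.enumerate (cs.foldl (encStepA P) ((k : Int), ca)).2.flatten 0) := by
  intro cs
  induction cs with
  | nil => intro k ca pb _ _ _ hacc; exact ⟨rfl, hacc⟩
  | cons cy cs ih =>
    intro k ca pb hperm htail hlen hacc
    have hpc : cycleOk cy := hperm cy (by simp)
    have hpcs : ∀ cy' ∈ cs, cycleOk cy' := fun cy' h => hperm cy' (by simp [h])
    simp only [List.foldl_cons]
    have hstepA : encStepA P ((k : Int), ca) cy =
        (((k + cy.length : Nat) : Int), ca ++ blockA P k cy) := by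
      simp only [encStepA, blockA, PySem.List.len_eq, PySem.List.slice_natCast_add]
      push_cast
      rfl
    have hstepB : encStepB P ((k : Int), pb) cy =
        (((k + cy.length : Nat) : Int), pb ++ ((cy.zip ((P.drop k).take cy.length)).map (fun p => ((k : Int) + p.1 - 1, p.2)))) := by
      simp only [encStepB, PySem.List.len_eq, PySem.List.slice_natCast_add]
      push_cast
      rfl
    set b : List Char := (P.drop k).take cy.length with hbdef
    have hmlen : b.length = min cy.length (P.length - k) := by simp [hbdef]
    have hm : b.length ≤ cy.length := by omega
    -- the prefix condition, from the tail condition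
    have hpref : ∀ x ∈ cy.take b.length, x ≤ ((b.length : Nat) : Int) := by
      intro x hx
      rcases htail with hk | ht
      · have : b.length = 0 := by omega
        rw [this] at hx
        simp at hx
      · simp only [tailOkB] at ht
        by_cases hfull : cy.length ≤ P.length - k
        · have hbl : b.length = cy.length := by omega
          rw [hbl] at hx ⊢
          have := cycleOk_mem_bounds hpc x (List.mem_of_mem_take hx)
          omega
        · rw [if_neg hfull] at ht
          have hbl : b.length = P.length - k := by omega
          rw [hbl] at hx ⊢
          have := (List.all_eq_true.mp ht) x hx
          simpa using this
    have hblock : blockA P k cy = scatterB cy b := block_eq cy b hpc hm hpref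
    have hflat : (blockA P k cy).flatten = (List.range b.length).map (gchar cy b) := by
      rw [hblock]; exact scatter_flatten cy b hpc hm hpref
    have hflatlen : (blockA P k cy).flatten.length = b.length := by
      rw [hflat]; simp
    have hrec := ih (k + cy.length) (ca ++ blockA P k cy)
        (pb ++ ((cy.zip b).map (fun p => ((k : Int) + p.1 - 1, p.2)))) hpcs ?side ?len ?acc
    case side =>
      rcases htail with hk | ht
      · exact Or.inl (by omega)
      · simp only [tailOkB] at ht
        by_cases hfull : cy.length ≤ P.length - k
        · rw [if_pos hfull] at ht
          refine Or.inr ?_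
          have : P.length - (k + cy.length) = P.length - k - cy.length := by omega
          rw [this]
          exact ht
        · exact Or.inl (by omega)
    case len =>
      rw [List.flatten_append, List.length_append, hlen, hflatlen]
      omega
    case acc =>
      rw [List.flatten_append, PySem.List.enumerate_append]
      by_cases hk : k ≤ P.length
      · have hstart : (0 + (ca.flatten.length : Int)) = (k : Int) := by
          rw [hlen]; simp; omega
        rw [hstart]
        exact hacc.append ((pairs_perm cy b k hpc hm hpref).trans (by rw [hflat]))
      · -- past the end of plain: nothing is added on either side
        have hb0 : b.length = 0 := by omega
        have hbnil : b = [] := List.eq_nil_of_length_eq_zero hb0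
        have hfl : (blockA P k cy).flatten = [] := by
          rw [hflat, hb0]; rfl
        rw [hbnil, hfl]
        simpa using hacc
    rw [hstepA, hstepB]
    exact hrec

-- ===== VERDICT (by name: the statement is the Claim_ definition above) =====
theorem richelieu_encode_spec : Claim_equal_richelieu_encode := by
  intro plain key _ hpre
  unfold Spec_richelieu_encode richelieu_encode richelieu_encode_alt
  obtain ⟨h1, h2⟩ := hpre
  have h := outer plain.toList (parseCycles key) 0 [] [] h1 (Or.inr (by simpa using h2)) (by simp) (by simp)
  rcases h with ⟨hidx, hperm⟩
  simp only [Nat.cast_zero] at hidx hperm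
  have hsorted : PySem.List.sorted ((parseCycles key).foldl (encStepB plain.toList) (0, [])).2 (fun p => p.1) false
      = PySem.List.enumerate ((parseCycles key).foldl (encStepA plain.toList) (0, [])).2.flatten 0 := by
    apply PySem.List.sorted_eq_of_perm_of_pairwise_lt
    · exact hperm.symm
    · exact PySem.List.pairwise_lt_enumerate _ _
  apply congrArg String.ofList
  rw [hsorted, PySem.List.map_snd_enumerate, hidx]
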